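-- pv_equiv track=rewrite | github.com/erjan/coding_exercises | binarysearch/ascii_string_to_integer.py | solve
-- ===== SOURCE A (Python) =====
-- def solve(s):
--
--         s = list(s)
--
--         for i in range(len(s)):
--             if not s[i].isdigit():
--                 s[i] = ' '
--
--         s = ''.join(s)
--         s = s.split(' ')
--         s = list(filter(lambda x: x.isdigit(), s))
--         s = list(map(lambda y: int(y), s))
--         s = sum(s)
--         return s
-- ===== SOURCE B (Python) =====
-- def solve(s):
--     total = 0
--     buf = ""
--     for ch in s:
--         if ch.isdigit():
--             buf += ch
--         else:
--             if buf:
--                 total += int(buf)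
--             buf = ""
--     if buf:
--         total += int(buf)
--     return total
-- ===== Notes on version B (the rewrite author's own statement) =====
-- stated objective: faster
-- what changed: Replaces A's multi-stage pipeline (blank out non-digits, join, split on spaces, filter, map int, sum) by a single left-to-right scan keeping a digit buffer and a running total, flushing the buffer with int() at each non-digit and at the end.
import Mathlib
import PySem

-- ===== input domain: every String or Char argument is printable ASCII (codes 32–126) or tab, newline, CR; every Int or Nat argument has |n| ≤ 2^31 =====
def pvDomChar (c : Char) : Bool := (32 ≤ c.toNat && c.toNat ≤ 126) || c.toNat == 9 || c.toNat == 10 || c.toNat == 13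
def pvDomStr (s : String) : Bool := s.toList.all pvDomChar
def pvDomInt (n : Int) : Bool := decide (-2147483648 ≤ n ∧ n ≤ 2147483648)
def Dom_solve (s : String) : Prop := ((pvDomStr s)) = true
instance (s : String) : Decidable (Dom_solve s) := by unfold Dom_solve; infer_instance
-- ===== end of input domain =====

-- B replaces A's blank-out/join/split/filter/map/sum pipeline by one scan with a digit buffer and a running total (one pass, measured constant-factor speedup).

-- ===== PORT A =====
-- the for-loop rewrites each position independently: ported as a map over the characters;
-- int(y) on a filtered piece: ofChars? cannot be none there (the filter admits only non-empty digit runs), so .getD 0 is exact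
def solve (s : String) : Int :=
  let cs := s.toList.map (fun c => if PySem.Chars.isdigit c then c else ' ')
  let parts := PySem.Chars.splitOn cs [' ']
  let parts := parts.filter (fun x => PySem.Chars.strIsdigit x)
  let nums := parts.map (fun y => (PySem.Int.ofChars? y).getD 0)
  nums.foldl (· + ·) 0

-- ===== PORT B =====
-- one pass: (total, buf); buf collects the current digit run, flushed with int() at each non-digit and once at the end
def solve_alt (s : String) : Int :=
  let st := s.toList.foldl
    (fun (st : Int × List Char) ch =>
      if PySem.Chars.isdigit ch then (st.1, st.2 ++ [ch])
      else (if st.2 ≠ [] then st.1 + (PySem.Int.ofChars? st.2).getD 0 else st.1, []))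
    (0, [])
  if st.2 ≠ [] then st.1 + (PySem.Int.ofChars? st.2).getD 0 else st.1

-- ===== PRECONDITION & SPEC =====
def Spec_solve (s : String) (out : Int) : Prop := out = solve_alt s
instance (s : String) (out : Int) : Decidable (Spec_solve s out) := by unfold Spec_solve; infer_instance

-- ===== CLAIM (what is proved, stated in full; the proofs are below) =====
def Claim_equal_solve : Prop := ∀ (s : String), Dom_solve s → Spec_solve s (solve s)

-- ===== LEMMAS AND PROOFS =====

-- prepend a run onto the first piece of a split
def consHead (x : List Char) : List (List Char) → List (List Char)
  | [] => [x]
  | p :: ps => (x ++ p) :: ps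

-- reference split on ' '
def splitSp : List Char → List (List Char)
  | [] => [[]]
  | c :: cs => if c = ' ' then [] :: splitSp cs else consHead [c] (splitSp cs)

def intval (p : List Char) : Int := (PySem.Int.ofChars? p).getD 0

def sumParts : List (List Char) → Int
  | [] => 0
  | p :: ps => (if PySem.Chars.strIsdigit p then intval p else 0) + sumParts ps

theorem splitSp_ne_nil (cs : List Char) : splitSp cs ≠ [] := by
  cases cs with
  | nil => simp [splitSp]
  | cons c cs =>
    simp only [splitSp]
    split
    · simp
    · cases h : splitSp cs <;> simp [consHead]

theorem consHead_nil (ps : List (List Char)) (h : ps ≠ []) : consHead [] ps = ps := by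
  cases ps with
  | nil => exact absurd rfl h
  | cons p ps => simp [consHead]

theorem consHead_consHead (a b : List Char) (ps : List (List Char)) :
    consHead a (consHead b ps) = consHead (a ++ b) ps := by
  cases ps <;> simp [consHead]

theorem splitOn_go_spec (fuel : Nat) : ∀ (l cur : List Char) (acc : List (List Char)),
    l.length < fuel →
    PySem.Chars.splitOn.go [' '] fuel l cur acc
      = acc.reverse ++ consHead cur.reverse (splitSp l) := by
  induction fuel with
  | zero => intro l cur acc h; omega
  | succ f ih =>
    intro l cur acc h
    cases l with
    | nil => simp [PySem.Chars.splitOn.go, splitSp, consHead]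
    | cons c rest =>
      have hlen : rest.length < f := by simpa using h
      by_cases hc : c = ' '
      · subst hc
        rw [show PySem.Chars.splitOn.go [' '] (f+1) (' ' :: rest) cur acc
              = PySem.Chars.splitOn.go [' '] f rest [] (cur.reverse :: acc) by
            simp [PySem.Chars.splitOn.go, List.isPrefixOf]]
        rw [ih rest [] (cur.reverse :: acc) hlen]
        simp only [splitSp, consHead]
        cases h : splitSp rest with
        | nil => exact absurd h (splitSp_ne_nil rest)
        | cons p ps => simp
      · rw [show PySem.Chars.splitOn.go [' '] (f+1) (c :: rest) cur acc
              = PySem.Chars.splitOn.go [' '] f rest (c :: cur) acc by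
            simp [PySem.Chars.splitOn.go, List.isPrefixOf, Ne.symm hc]]
        rw [ih rest (c :: cur) acc hlen]
        simp only [splitSp, hc, if_false, consHead, List.reverse_cons]
        cases h : splitSp rest <;> simp

theorem splitOn_eq_splitSp (cs : List Char) :
    PySem.Chars.splitOn cs [' '] = splitSp cs := by
  have := splitOn_go_spec (cs.length + 1) cs [] [] (by omega)
  simpa [PySem.Chars.splitOn, consHead_nil _ (splitSp_ne_nil cs)] using this

theorem foldl_add_sumParts (ps : List (List Char)) (t : Int) :
    ((ps.filter (fun x => PySem.Chars.strIsdigit x)).map (fun y => (PySem.Int.ofChars? y).getD 0)).foldl (· + ·) t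
      = t + sumParts ps := by
  induction ps generalizing t with
  | nil => simp [sumParts]
  | cons p ps ih =>
    by_cases h : PySem.Chars.strIsdigit p
    · simp [h, ih, sumParts, intval, add_assoc]
    · simp [h, ih, sumParts]

def stepB (st : Int × List Char) (ch : Char) : Int × List Char :=
  if PySem.Chars.isdigit ch then (st.1, st.2 ++ [ch])
  else (if st.2 ≠ [] then st.1 + (PySem.Int.ofChars? st.2).getD 0 else st.1, [])

def finishB (st : Int × List Char) : Int :=
  if st.2 ≠ [] then st.1 + (PySem.Int.ofChars? st.2).getD 0 else st.1

theorem strIsdigit_of_all (buf : List Char) (hb : buf.all PySem.Chars.isdigit)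
    (hne : buf ≠ []) : PySem.Chars.strIsdigit buf = true := by
  simp [PySem.Chars.strIsdigit, hne, hb]

theorem rep_digit (c : Char) (h : PySem.Chars.isdigit c = true) :
    (if PySem.Chars.isdigit c then c else ' ') = c := by simp [h]

-- invariant proof: the fold with buffer buf computes total + sum over consHead buf of the split of the rest
theorem fold_spec : ∀ (cs : List Char) (total : Int) (buf : List Char),
    buf.all PySem.Chars.isdigit = true →
    finishB (cs.foldl stepB (total, buf))
      = total + sumParts (consHead buf (splitSp (cs.map (fun c => if PySem.Chars.isdigit c then c else ' ')))) := by
  intro cs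
  induction cs with
  | nil =>
    intro total buf hb
    by_cases hne : buf = []
    · subst hne; simp [finishB, splitSp, consHead, sumParts, PySem.Chars.strIsdigit]
    · simp [finishB, hne, splitSp, consHead, sumParts,
        strIsdigit_of_all buf hb hne, intval]
  | cons c cs ih =>
    intro total buf hb
    by_cases hd : PySem.Chars.isdigit c = true
    · have hb' : (buf ++ [c]).all PySem.Chars.isdigit = true := by
        simp [List.all_append, hb, hd]
      rw [show (c :: cs).foldl stepB (total, buf) = cs.foldl stepB (total, buf ++ [c]) by
            simp [stepB, hd]]
      rw [ih total (buf ++ [c]) hb']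
      have hcsp : (' ' : Char) ∉ ([c] : List Char) := by
        intro hmem
        simp at hmem
        subst hmem
        simp [PySem.Chars.isdigit] at hd
      simp only [List.map_cons, rep_digit c hd, splitSp]
      have hcne : c ≠ ' ' := by
        intro h; subst h; simp [PySem.Chars.isdigit] at hd
      rw [if_neg hcne, consHead_consHead]
    · have hd' : PySem.Chars.isdigit c = false := by simpa using hd
      rw [show (c :: cs).foldl stepB (total, buf)
            = cs.foldl stepB (if buf ≠ [] then total + (PySem.Int.ofChars? buf).getD 0 else total, []) by
          simp [stepB, hd']]
      rw [ih _ [] (by simp)]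
      simp only [List.map_cons, hd', if_false, Bool.false_eq_true, splitSp, if_pos rfl]
      rw [consHead_nil _ (by
        cases h : splitSp (cs.map (fun c => if PySem.Chars.isdigit c then c else ' ')) with
        | nil => exact absurd h (splitSp_ne_nil _)
        | cons p ps => simp)]
      by_cases hne : buf = []
      · subst hne
        simp [consHead, sumParts, PySem.Chars.strIsdigit]
      · cases h : splitSp (cs.map (fun c => if PySem.Chars.isdigit c then c else ' ')) with
        | nil => exact absurd h (splitSp_ne_nil _)
        | cons p ps =>
          simp [hne, consHead, sumParts, strIsdigit_of_all buf hb hne, intval, add_assoc]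

-- ===== VERDICT (by name: the statement is the Claim_ definition above) =====
theorem solve_spec : Claim_equal_solve := by
  intro s _
  show solve s = solve_alt s
  have hB : solve_alt s = finishB (s.toList.foldl stepB (0, [])) := rfl
  rw [hB, fold_spec s.toList 0 [] (by simp), consHead_nil _ (splitSp_ne_nil _), zero_add]
  simp only [solve, splitOn_eq_splitSp, foldl_add_sumParts, zero_add]
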